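-- pv_equiv track=rewrite | github.com/skmtrd/INIAD-study | cs_exercise/4/sutoro.py | repdigit
-- ===== SOURCE A (Python) =====
-- def repdigit(nums):
--     result = []
--     for num in nums:
--         s_num = str(num)
--         first = s_num[0]
--         pre_result = []
--         for i in s_num:
--             if i != first:
--                 break
--             else:
--                 pre_result.append(i)
--
--         if len(pre_result) == len(s_num):
--             result.append(num)
--
--     return result
-- ===== SOURCE B (Python) =====
-- def repdigit(nums):
--     return [num for num in nums if len(set(str(num))) == 1]
-- ===== Notes on version B (the rewrite author's own statement) =====
-- stated objective: idiomatic
-- what changed: Replaces the inner scan-with-break building pre_result and the length comparison with a single distinct-digit set-size test (len(set(str(num))) == 1) inside a list comprehension.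
import Mathlib
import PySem

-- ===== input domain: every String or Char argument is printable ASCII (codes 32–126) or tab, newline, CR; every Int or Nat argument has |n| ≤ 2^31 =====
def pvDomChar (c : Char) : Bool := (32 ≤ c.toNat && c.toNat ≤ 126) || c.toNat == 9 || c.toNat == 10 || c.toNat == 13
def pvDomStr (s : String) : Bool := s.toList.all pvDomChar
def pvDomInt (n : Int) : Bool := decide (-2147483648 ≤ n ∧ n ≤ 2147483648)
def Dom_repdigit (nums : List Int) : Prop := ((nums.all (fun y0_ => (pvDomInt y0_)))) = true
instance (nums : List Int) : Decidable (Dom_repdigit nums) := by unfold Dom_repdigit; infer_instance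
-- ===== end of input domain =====

-- B changes only the per-number test: a distinct-digit set-size check instead of A's
-- early-breaking scan; same order, same cost (objective: idiomatic).

-- ===== PORT A =====
-- inner 'for i in s_num: if i != first: break; else: pre_result.append(i)'
def scanA (first : Char) : List Char → List Char
  | [] => []
  | c :: rest => if c ≠ first then [] else c :: scanA first rest

def repdigit (nums : List Int) : List Int :=
  nums.foldl (fun result num =>
    let s := PySem.Int.toChars num          -- s_num = str(num)
    let first := s.headD ' '                -- s_num[0]; str(num) is never empty, so no IndexError
    let pre := scanA first s                -- pre_result
    if pre.length = s.length then result ++ [num] else result) []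

-- ===== PORT B =====
def repdigit_alt (nums : List Int) : List Int :=
  nums.filter (fun num => (PySem.Set.ofList (PySem.Int.toChars num)).length == 1)

-- ===== PRECONDITION & SPEC =====
def Spec_repdigit (nums : List Int) (out : List Int) : Prop := out = repdigit_alt nums
instance (nums : List Int) (out : List Int) : Decidable (Spec_repdigit nums out) := by unfold Spec_repdigit; infer_instance

-- ===== CLAIM (what is proved, stated in full; the proofs are below) =====
def Claim_equal_repdigit : Prop := ∀ (nums : List Int), Dom_repdigit nums → Spec_repdigit nums (repdigit nums)

-- ===== LEMMAS AND PROOFS =====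

-- str(num) is never empty
theorem tdc_len : ∀ (f n : Nat) (acc : List Char), (Nat.toDigitsCore 10 (f+1) n acc).length ≥ acc.length + 1 := by
  intro f
  induction f with
  | zero => intro n acc; rw [Nat.toDigitsCore]; split <;> simp [Nat.toDigitsCore]
  | succ f ih =>
    intro n acc
    rw [Nat.toDigitsCore]
    split
    · simp
    · have h1 := ih (n/10) (Nat.digitChar (n % 10) :: acc)
      simp only [List.length_cons] at h1
      omega

theorem toDigits_ne_nil (n : Nat) : Nat.toDigits 10 n ≠ [] := by
  unfold Nat.toDigits
  intro h
  have := tdc_len n n []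
  rw [h] at this
  simp at this

theorem toChars_ne_nil (n : Int) : PySem.Int.toChars n ≠ [] := by
  simp only [PySem.Int.toChars]
  split
  · simp
  · exact toDigits_ne_nil _

theorem scanA_len_iff (first : Char) : ∀ (cs : List Char),
    ((scanA first cs).length = cs.length) ↔ (∀ c ∈ cs, c = first) := by
  intro cs
  induction cs with
  | nil => simp [scanA]
  | cons c rest ih =>
    by_cases h : c = first
    · simp [scanA, h, ih]
    · have hs : scanA first (c :: rest) = [] := by simp [scanA, h]
      rw [hs]
      simp only [List.length_nil, List.length_cons]
      constructor
      · intro h0; exact absurd h0 (by omega)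
      · intro hall; exact absurd (hall c (by simp)) h

theorem ofList_const (c : Char) : ∀ (rest : List Char), (∀ x ∈ rest, x = c) →
    rest.foldl PySem.Set.add [c] = [c] := by
  intro rest
  induction rest with
  | nil => simp
  | cons x t ih =>
    intro h
    have hx : x = c := h x (by simp)
    have : PySem.Set.add [c] x = [c] := by
      simp [PySem.Set.add, PySem.Set.contains, hx]
    simp only [List.foldl_cons, this]
    exact ih (fun y hy => h y (by simp [hy]))

theorem set_len_one_iff (c : Char) (rest : List Char) :
    ((PySem.Set.ofList (c :: rest)).length = 1) ↔ (∀ x ∈ rest, x = c) := by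
  constructor
  · intro h1
    have hmem : ∀ x ∈ c :: rest, x ∈ PySem.Set.ofList (c :: rest) := by
      intro x hx; exact (PySem.Set.mem_ofList _ _).mpr hx
    obtain ⟨y, hy⟩ := List.length_eq_one_iff.mp h1
    intro x hx
    have hxs := hmem x (by simp [hx])
    have hcs := hmem c (by simp)
    rw [hy] at hxs hcs
    simp at hxs hcs
    rw [hxs, hcs]
  · intro h
    have : PySem.Set.ofList (c :: rest) = [c] := by
      rw [PySem.Set.ofList_eq_foldl]
      simp only [List.foldl_cons]
      have : PySem.Set.add [] c = [c] := by simp [PySem.Set.add, PySem.Set.contains]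
      rw [this]
      exact ofList_const c rest h
    rw [this]
    simp

theorem cond_eq (num : Int) :
    ((scanA ((PySem.Int.toChars num).headD ' ') (PySem.Int.toChars num)).length
        = (PySem.Int.toChars num).length)
      ↔ ((PySem.Set.ofList (PySem.Int.toChars num)).length = 1) := by
  obtain ⟨c, rest, hcr⟩ : ∃ c rest, PySem.Int.toChars num = c :: rest := by
    cases h : PySem.Int.toChars num with
    | nil => exact absurd h (toChars_ne_nil num)
    | cons c rest => exact ⟨c, rest, rfl⟩
  rw [hcr]
  simp only [List.headD_cons]
  rw [scanA_len_iff, set_len_one_iff]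
  simp

theorem foldl_filter (P : Int → Prop) [DecidablePred P] : ∀ (nums : List Int) (acc : List Int),
    nums.foldl (fun result num => if P num then result ++ [num] else result) acc
      = acc ++ nums.filter (fun num => decide (P num)) := by
  intro nums
  induction nums with
  | nil => simp
  | cons n t ih =>
    intro acc
    by_cases h : P n <;> simp [h, ih]

-- ===== VERDICT (by name: the statement is the Claim_ definition above) =====
theorem repdigit_spec : Claim_equal_repdigit := by
  intro nums _
  unfold Spec_repdigit repdigit repdigit_alt
  show List.foldl (fun result num =>
      if (scanA ((PySem.Int.toChars num).headD ' ') (PySem.Int.toChars num)).length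
          = (PySem.Int.toChars num).length then result ++ [num] else result) [] nums = _
  rw [foldl_filter, List.nil_append]
  congr 1
  funext num
  have h := cond_eq num
  by_cases hb : (PySem.Set.ofList (PySem.Int.toChars num)).length = 1
  · simp only [hb, beq_self_eq_true, decide_eq_true_eq]
    simpa using h.mpr hb
  · have hn : ¬ ((scanA ((PySem.Int.toChars num).headD ' ') (PySem.Int.toChars num)).length
        = (PySem.Int.toChars num).length) := fun hc => hb (h.mp hc)
    have : (List.length (PySem.Set.ofList (PySem.Int.toChars num)) == 1) = false := by
      simp [hb]
    rw [this, decide_eq_false_iff_not]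
    simpa using hn
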